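-- pv_equiv track=rewrite | github.com/AgiGames/LeetCode-Solutions | 1498. Number of Subsequences That Satisfy the Given Sum Condition/main.py | numSubseq
-- ===== SOURCE A (Python) =====
-- from typing import List
--
-- def numSubseq(nums: List[int], target: int) -> int:
--
--     mod = 10**9 + 7
--     n = len(nums)
--     nums.sort()
--     pow2mod = [1] * (n + 1)
--     for i in range(1, n + 1):
--         pow2mod[i] = (pow2mod[i - 1] << 1) % mod
--
--     l = 0
--     r = n - 1
--     sub_sequences = 0
--     while l <= r:
--         if nums[l] + nums[r] <= target:
--             sub_sequences = (sub_sequences + pow2mod[r-l]) % mod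
--             l += 1
--         else:
--             r -= 1
--
--     return sub_sequences
-- ===== SOURCE B (Python) =====
-- from typing import List
--
-- def _bisect_right(a: List[int], x: int) -> int:
--     # hand-rolled bisect.bisect_right (A imports no stdlib modules we could reuse)
--     lo, hi = 0, len(a)
--     while lo < hi:
--         mid = (lo + hi) // 2
--         if x < a[mid]:
--             hi = mid
--         else:
--             lo = mid + 1
--     return lo
--
-- def numSubseq(nums: List[int], target: int) -> int:
--     mod = 10**9 + 7
--     nums.sort()
--     n = len(nums)
--     pow2 = [1] * (n + 1)
--     for k in range(1, n + 1):
--         pow2[k] = pow2[k - 1] * 2 % mod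
--     ans = 0
--     for i in range(n):
--         # nums[i] as the minimum: the maximum may sit at any index in i..pos-1
--         pos = _bisect_right(nums, target - nums[i])
--         if pos >= i + 1:
--             ans = (ans + pow2[pos - 1 - i]) % mod
--     return ans
-- ===== Notes on version B (the rewrite author's own statement) =====
-- stated objective: alternative
-- what changed: Replaces A's coupled two-pointer sweep with an independent per-minimum binary search: for each index i a hand-rolled bisect_right finds the last index j with nums[i]+nums[j] <= target and adds 2^(j-i) mod 1e9+7.
import Mathlib
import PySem

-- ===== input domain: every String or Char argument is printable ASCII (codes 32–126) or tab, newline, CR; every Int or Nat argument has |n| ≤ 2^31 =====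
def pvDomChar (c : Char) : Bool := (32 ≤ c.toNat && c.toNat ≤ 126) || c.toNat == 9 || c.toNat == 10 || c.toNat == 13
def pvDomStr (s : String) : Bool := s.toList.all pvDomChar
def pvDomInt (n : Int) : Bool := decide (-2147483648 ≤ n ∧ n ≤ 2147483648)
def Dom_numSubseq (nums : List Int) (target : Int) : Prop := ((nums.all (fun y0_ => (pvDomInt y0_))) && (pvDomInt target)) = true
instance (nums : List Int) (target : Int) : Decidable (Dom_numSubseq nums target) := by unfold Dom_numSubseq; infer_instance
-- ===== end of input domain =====

-- B replaces A's coupled two-pointer sweep with an independent binary search per minimum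
-- element (objective: alternative, same O(n log n)); both Pythons sort nums in place —
-- the equivalence proved here is about the return value.

-- ===== PORT A =====
-- shared power table: pw k = A's pow2mod[k] (= B's pow2[k]), the (· * 2 % mod) recurrence
def pw : Nat → Int
  | 0 => 1
  | k + 1 => pw k * 2 % 1000000007

-- A's while loop; structural recursion on fuel = r + 1 - l, which each iteration decreases
-- by exactly 1 (a totality guard only: at fuel 0 the loop condition l ≤ r is already false).
-- List accesses use getD: every reachable state has 0 ≤ l ≤ r < length, where Python's
-- nums[l], nums[r] are exact.
def loopAF : Nat → List Int → Int → Nat → Int → Int → Int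
  | 0, _, _, _, _, acc => acc
  | fuel + 1, s, target, l, r, acc =>
    if (l : Int) ≤ r then
      if s.getD l 0 + s.getD r.toNat 0 ≤ target then
        loopAF fuel s target (l + 1) r ((acc + pw (r.toNat - l)) % 1000000007)
      else
        loopAF fuel s target l (r - 1) acc
    else acc

def numSubseq (nums : List Int) (target : Int) : Int :=
  let s := PySem.List.sorted nums (fun x => x) false
  loopAF ((((s.length : Int) - 1) + 1 - 0).toNat) s target 0 ((s.length : Int) - 1) 0

-- ===== PORT B =====
-- hand-rolled bisect_right from Source B, step for step; structural recursion on
-- fuel = hi - lo (a totality guard only: at fuel 0 the loop condition lo < hi is false)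
def bsrF : Nat → List Int → Int → Nat → Nat → Nat
  | 0, _, _, lo, _ => lo
  | fuel + 1, a, x, lo, hi =>
    if lo < hi then
      let mid := (lo + hi) / 2
      if x < a.getD mid 0 then bsrF fuel a x lo mid else bsrF fuel a x (mid + 1) hi
    else lo

def bsr (a : List Int) (x : Int) (lo hi : Nat) : Nat := bsrF (hi - lo) a x lo hi

def numSubseq_alt (nums : List Int) (target : Int) : Int :=
  let s := PySem.List.sorted nums (fun x => x) false
  (List.range s.length).foldl
    (fun acc i =>
      let pos := bsr s (target - s.getD i 0) 0 s.length
      if i + 1 ≤ pos then (acc + pw (pos - 1 - i)) % 1000000007 else acc)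
    0

-- ===== PRECONDITION & SPEC =====
def Spec_numSubseq (nums : List Int) (target : Int) (out : Int) : Prop := out = numSubseq_alt nums target
instance (nums : List Int) (target : Int) (out : Int) : Decidable (Spec_numSubseq nums target out) := by unfold Spec_numSubseq; infer_instance

-- ===== CLAIM (what is proved, stated in full; the proofs are below) =====
def Claim_equal_numSubseq : Prop := ∀ (nums : List Int) (target : Int), Dom_numSubseq nums target → Spec_numSubseq nums target (numSubseq nums target)

-- ===== LEMMAS AND PROOFS =====

-- contribution of index i (as computed by B)
def contrib (s : List Int) (target : Int) (i : Nat) : Int :=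
  let pos := bsr s (target - s.getD i 0) 0 s.length
  if i + 1 ≤ pos then pw (pos - 1 - i) else 0

-- monotone access in a ≤-sorted list
lemma getD_mono (s : List Int) (hs : s.Pairwise (· ≤ ·)) {i j : Nat}
    (hij : i ≤ j) (hj : j < s.length) : s.getD i 0 ≤ s.getD j 0 := by
  rcases eq_or_lt_of_le hij with rfl | hlt
  · exact le_refl _
  · have := (List.pairwise_iff_getElem.mp hs) i j (lt_trans hlt hj) hj hlt
    simpa [List.getD_eq_getElem?_getD, List.getElem?_eq_getElem, lt_trans hlt hj, hj] using this

-- bsrF's result m: lo ≤ m ≤ hi and, under the bisection invariants, s[k] ≤ x ↔ k < m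
lemma bsrF_char (s : List Int) (x : Int) (fuel : Nat) : ∀ (lo hi : Nat),
    hi - lo ≤ fuel →
    s.Pairwise (· ≤ ·) → hi ≤ s.length →
    lo ≤ hi →
    (∀ k, k < lo → s.getD k 0 ≤ x) →
    (∀ k, hi ≤ k → k < s.length → x < s.getD k 0) →
    lo ≤ bsrF fuel s x lo hi ∧ bsrF fuel s x lo hi ≤ hi ∧
      ∀ k, k < s.length → (s.getD k 0 ≤ x ↔ k < bsrF fuel s x lo hi) := by
  induction fuel with
  | zero =>
    intro lo hi hf hs hhi hle hlo hup
    have : lo = hi := by omega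
    subst this
    refine ⟨le_refl _, le_refl _, fun k hk => ?_⟩
    simp only [bsrF]
    constructor
    · intro hkx
      by_contra hk2
      exact absurd hkx (not_le.mpr (hup k (by omega) hk))
    · intro hk2
      exact hlo k hk2
  | succ fuel ih =>
    intro lo hi hf hs hhi hle hlo hup
    simp only [bsrF]
    by_cases h : lo < hi
    · simp only [h, if_pos]
      have hmidlt : (lo + hi) / 2 < hi := by omega
      have hmidge : lo ≤ (lo + hi) / 2 := by omega
      by_cases hc : x < s.getD ((lo + hi) / 2) 0
      · simp only [hc, if_pos]
        have := ih lo ((lo + hi) / 2) (by omega) hs (le_trans (le_of_lt hmidlt) hhi)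
          hmidge hlo (fun k hk hkn => lt_of_lt_of_le hc (getD_mono s hs hk hkn))
        exact ⟨this.1, le_trans this.2.1 (le_of_lt hmidlt), this.2.2⟩
      · simp only [hc, if_neg, not_false_iff]
        rw [not_lt] at hc
        have := ih ((lo + hi) / 2 + 1) hi (by omega) hs hhi (by omega)
          (fun k hk => le_trans (getD_mono s hs (by omega) (lt_of_lt_of_le hmidlt hhi)) hc) hup
        exact ⟨le_trans (by omega) this.1, this.2.1, this.2.2⟩
    · simp only [h, if_neg, not_false_iff]
      have : lo = hi := by omega
      subst this
      refine ⟨le_refl _, le_refl _, fun k hk => ?_⟩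
      constructor
      · intro hkx
        by_contra hk2
        exact absurd hkx (not_le.mpr (hup k (by omega) hk))
      · intro hk2
        exact hlo k hk2

-- bsr over the whole list, characterised
lemma bsr_char (s : List Int) (x : Int) (hs : s.Pairwise (· ≤ ·)) :
    bsr s x 0 s.length ≤ s.length ∧
      ∀ k, k < s.length → (s.getD k 0 ≤ x ↔ k < bsr s x 0 s.length) := by
  have := bsrF_char s x (s.length - 0) 0 s.length (le_refl _) hs (le_refl _) (Nat.zero_le _)
    (fun k hk => absurd hk (Nat.not_lt_zero k)) (fun k hk hk2 => absurd hk2 (by omega))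
  exact ⟨this.2.1, this.2.2⟩

-- iterated "(acc + g i) % mod, guarded" fold = sum mod
lemma fold_mod (m : Int) (g : Nat → Int) (p : Nat → Bool) (L : List Nat) (a : Int) :
    L.foldl (fun acc i => if p i then (acc + g i) % m else acc) (a % m)
      = (a + (L.map (fun i => if p i then g i else 0)).sum) % m := by
  induction L generalizing a with
  | nil => simp
  | cons i L ih =>
    simp only [List.foldl_cons, List.map_cons, List.sum_cons]
    by_cases hp : p i
    · rw [hp]
      simp only [if_pos]
      rw [Int.emod_add_emod, ih (a + g i)]
      ring_nf
    · simp only [hp, Bool.false_eq_true, not_false_iff, if_neg]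
      rw [ih a, zero_add]

-- once the pointers have crossed (r < l), every remaining index contributes 0
lemma contrib_sum_zero (s : List Int) (target : Int) (hs : s.Pairwise (· ≤ ·))
    (l : Nat) (r : Int) (hcross : r < (l : Int))
    (hinv : ∀ k : Nat, r < (k : Int) → k < s.length → target < s.getD l 0 + s.getD k 0) :
    ((List.range' l (s.length - l)).map (contrib s target)).sum = 0 := by
  apply List.sum_eq_zero
  intro x hx
  rw [List.mem_map] at hx
  obtain ⟨i, hi, rfl⟩ := hx
  rw [List.mem_range'_1] at hi
  have hil : l ≤ i := hi.1
  have hin : i < s.length := by omega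
  have hchar := bsr_char s (target - s.getD i 0) hs
  simp only [contrib]
  rw [if_neg]
  intro hJi
  have hii : s.getD i 0 ≤ target - s.getD i 0 := (hchar.2 i hin).mpr (by omega)
  have h1 := hinv i (by omega) hin
  have h2 := getD_mono s hs hil hin
  omega

-- the main invariant of A's two-pointer sweep
lemma loopAF_eq (s : List Int) (target : Int) (hs : s.Pairwise (· ≤ ·)) (fuel : Nat) :
    ∀ (l : Nat) (r : Int) (a : Int),
    (r + 1 - (l : Int)).toNat ≤ fuel →
    r < (s.length : Int) →
    (∀ k : Nat, r < (k : Int) → k < s.length → target < s.getD l 0 + s.getD k 0) →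
    loopAF fuel s target l r (a % 1000000007)
      = (a + ((List.range' l (s.length - l)).map (contrib s target)).sum) % 1000000007 := by
  induction fuel with
  | zero =>
    intro l r a hf hrn hinv
    have hcross : r < (l : Int) := by omega
    simp only [loopAF]
    rw [contrib_sum_zero s target hs l r hcross hinv, add_zero]
  | succ fuel ih =>
    intro l r a hf hrn hinv
    simp only [loopAF]
    by_cases h : (l : Int) ≤ r
    · have hln : l < s.length := by omega
      have hrtn : r.toNat < s.length := by omega
      have hrange : List.range' l (s.length - l) = l :: List.range' (l + 1) (s.length - (l + 1)) := by
        have : s.length - l = (s.length - (l + 1)) + 1 := by omega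
        rw [this, List.range'_succ]
      simp only [h, if_pos]
      by_cases hc : s.getD l 0 + s.getD r.toNat 0 ≤ target
      · simp only [hc, if_pos]
        -- the binary search for minimum l lands exactly at r+1
        have hchar := bsr_char s (target - s.getD l 0) hs
        set J := bsr s (target - s.getD l 0) 0 s.length with hJ
        have hJr : J = r.toNat + 1 := by
          have h1 : r.toNat < J := (hchar.2 r.toNat hrtn).mp (by omega)
          by_contra hne
          have h2 : r.toNat + 1 < J := by omega
          have h3 : r.toNat + 1 < s.length := by omega
          have h4 := (hchar.2 (r.toNat + 1) h3).mpr (by omega)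
          have h5 := hinv (r.toNat + 1) (by omega) h3
          omega
        have hcl : contrib s target l = pw (r.toNat - l) := by
          simp only [contrib, ← hJ, hJr]
          rw [if_pos (by omega)]
          congr 1
        rw [hrange]
        simp only [List.map_cons, List.sum_cons, hcl]
        have hinv' : ∀ k : Nat, r < (k : Int) → k < s.length →
            target < s.getD (l + 1) 0 + s.getD k 0 := by
          intro k hk1 hk2
          have hl1 : l + 1 ≤ k := by omega
          have h4 := getD_mono s hs hl1 hk2
          have h5 := getD_mono s hs (Nat.le_add_right l 1) (by omega : l + 1 < s.length)
          have h6 := hinv k hk1 hk2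
          omega
        have := ih (l + 1) r (a + pw (r.toNat - l)) (by omega) hrn hinv'
        rw [Int.emod_add_emod, this]
        ring_nf
      · simp only [hc, if_neg, not_false_iff]
        have hinv' : ∀ k : Nat, r - 1 < (k : Int) → k < s.length →
            target < s.getD l 0 + s.getD k 0 := by
          intro k hk1 hk2
          by_cases hkr : r < (k : Int)
          · exact hinv k hkr hk2
          · have : k = r.toNat := by omega
            subst this
            omega
        exact ih l (r - 1) a (by omega) (by omega) hinv'
    · simp only [h, if_neg, not_false_iff]
      rw [contrib_sum_zero s target hs l r (by omega) hinv, add_zero]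

-- ===== VERDICT (by name: the statement is the Claim_ definition above) =====
theorem numSubseq_spec : Claim_equal_numSubseq := by
  intro nums target _
  unfold Spec_numSubseq numSubseq numSubseq_alt
  set s := PySem.List.sorted nums (fun x => x) false with hs
  have hpair : s.Pairwise (· ≤ ·) := PySem.List.sorted_pairwise nums (fun x => x)
  have hA := loopAF_eq s target hpair ((((s.length : Int) - 1) + 1 - 0).toNat)
    0 ((s.length : Int) - 1) 0 (le_refl _) (by omega) (fun k hk1 hk2 => by omega)
  have hB := fold_mod 1000000007
    (fun i => pw (bsr s (target - s.getD i 0) 0 s.length - 1 - i))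
    (fun i => decide (i + 1 ≤ bsr s (target - s.getD i 0) 0 s.length))
    (List.range s.length) 0
  simp only [Int.zero_emod, zero_add] at hA
  rw [hA]
  have : (List.range s.length).foldl
      (fun acc i =>
        let pos := bsr s (target - s.getD i 0) 0 s.length
        if i + 1 ≤ pos then (acc + pw (pos - 1 - i)) % 1000000007 else acc) 0
      = (List.range s.length).foldl
      (fun acc i => if decide (i + 1 ≤ bsr s (target - s.getD i 0) 0 s.length) = true
        then (acc + pw (bsr s (target - s.getD i 0) 0 s.length - 1 - i)) % 1000000007 else acc)
      (0 % 1000000007) := by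
    simp only [Int.zero_emod, decide_eq_true_eq]
  rw [this, hB, zero_add]
  congr 1
  rw [List.range_eq_range']
  congr 1
  apply List.map_congr_left
  intro i _
  simp only [contrib, decide_eq_true_eq]
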